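-- pv_equiv track=rewrite | github.com/DrozdzynskiDawid/Python | canyougetpalindrome.py | palindrome_without2letters
-- ===== SOURCE A (Python) =====
-- def palindrome_without2letters(t):
--     if t.lower() == t[::-1].lower():
--         return True
--     for i in range(len(t)):
--         t1 = t[0:i] + t[i+1:len(t)]
--         if t1.lower() == t1[::-1].lower():
--             return True
--         else:
--             for j in range(len(t1)):
--                 t2 = t1[0:j] + t1[j+1:len(t1)]
--                 if t2.lower() == t2[::-1].lower():
--                     return True
--     return False
-- ===== SOURCE B (Python) =====
-- def palindrome_without2letters(t):
--     def chk(s, k):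
--         while len(s) >= 2:
--             if s[0] == s[-1]:
--                 s = s[1:-1]
--             else:
--                 return k > 0 and (chk(s[1:], k - 1) or chk(s[:-1], k - 1))
--         return True
--     return chk(t.lower(), 2)
-- ===== Notes on version B (the rewrite author's own statement) =====
-- stated objective: faster
-- what changed: Replaced the brute-force enumeration of all single and double deletions (each with a full palindrome check) by a two-pointer scan on the lowercased string that branches only at a mismatch with a deletion budget of 2.
import Mathlib
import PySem

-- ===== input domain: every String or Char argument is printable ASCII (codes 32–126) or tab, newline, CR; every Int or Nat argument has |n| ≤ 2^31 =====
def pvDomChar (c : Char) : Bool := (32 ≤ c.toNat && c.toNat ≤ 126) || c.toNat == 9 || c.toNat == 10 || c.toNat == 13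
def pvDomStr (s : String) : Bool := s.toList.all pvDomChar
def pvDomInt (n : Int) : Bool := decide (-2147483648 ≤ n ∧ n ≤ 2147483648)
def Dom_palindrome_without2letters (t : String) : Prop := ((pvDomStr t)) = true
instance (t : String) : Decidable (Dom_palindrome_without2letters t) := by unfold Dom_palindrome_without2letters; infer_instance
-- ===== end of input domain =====

-- B replaces A's brute-force enumeration of all ≤2-deletion variants (each re-checked in full)
-- by a two-pointer scan with a deletion budget of 2; equal return values proved for all inputs.

-- ===== PORT A =====
-- s.lower() == s[::-1].lower()  (the palindrome test A repeats on every candidate)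
def pvIsPal (s : List Char) : Bool :=
  PySem.Chars.lower s == PySem.Chars.lower ((PySem.List.slice? s none none (-1)).getD s)

def palindrome_without2letters (t : String) : Bool :=
  if pvIsPal t.toList then true
  else
    (PySem.List.pyRange 0 (PySem.Chars.len t.toList) 1).any fun i =>
      let t1 := PySem.List.slice t.toList (some 0) (some i) ++
                PySem.List.slice t.toList (some (i + 1)) (some (PySem.Chars.len t.toList))
      if pvIsPal t1 then true
      else
        (PySem.List.pyRange 0 (PySem.Chars.len t1) 1).any fun j =>
          let t2 := PySem.List.slice t1 (some 0) (some j) ++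
                    PySem.List.slice t1 (some (j + 1)) (some (PySem.Chars.len t1))
          pvIsPal t2

-- ===== PORT B =====
-- chk(s, k): while the two ends match, strip them; on a mismatch spend one deletion
-- on either side (if any budget k is left).
def pvChk (s : List Char) (k : Nat) : Bool :=
  match s with
  | [] => true
  | [_] => true
  | a :: x :: xs =>
    if a == (x :: xs).getLast (List.cons_ne_nil x xs) then
      pvChk (x :: xs).dropLast k
    else
      match k with
      | 0 => false
      | k' + 1 => pvChk (x :: xs) k' || pvChk (a :: (x :: xs).dropLast) k'
termination_by s.length
decreasing_by all_goals (simp; try omega)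

def palindrome_without2letters_alt (t : String) : Bool :=
  pvChk (PySem.Chars.lower t.toList) 2

-- ===== PRECONDITION & SPEC =====
def Spec_palindrome_without2letters (t : String) (out : Bool) : Prop := out = palindrome_without2letters_alt t
instance (t : String) (out : Bool) : Decidable (Spec_palindrome_without2letters t out) := by unfold Spec_palindrome_without2letters; infer_instance

-- ===== CLAIM (what is proved, stated in full; the proofs are below) =====
def Claim_equal_palindrome_without2letters : Prop := ∀ (t : String), Dom_palindrome_without2letters t → Spec_palindrome_without2letters t (palindrome_without2letters t)

-- ===== LEMMAS AND PROOFS =====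

-- A's palindrome test is "the lowercased list equals its own reverse".
theorem pvIsPal_iff (s : List Char) :
    pvIsPal s = true ↔ (PySem.Chars.lower s).reverse = PySem.Chars.lower s := by
  rw [pvIsPal, PySem.List.slice?_none_none_neg_one]
  rw [Option.getD_some, PySem.Chars.lower, PySem.Chars.lower, List.map_reverse, beq_iff_eq, eq_comm]

-- one sublist step: a strictly shorter sublist factors through some single-index erasure
theorem sublist_eraseIdx_step {α : Type} {u c : List α} (h : u.Sublist c)
    (hl : u.length < c.length) : ∃ i < c.length, u.Sublist (c.eraseIdx i) := by
  induction h with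
  | slnil => simp at hl
  | @cons l₁ l₂ a h ih =>
    exact ⟨0, by simp, by simpa using h⟩
  | @cons₂ l₁ l₂ a h ih =>
    by_cases hlen : l₁.length < l₂.length
    · obtain ⟨i, hi, hsub⟩ := ih hlen
      exact ⟨i + 1, by simpa using hi, by simpa using hsub.cons₂ a⟩
    · have : l₁ = l₂ := h.eq_of_length_le (by omega)
      subst this; simp at hl

-- A's candidate t[0:i] + t[i+1:len(t)] is exactly eraseIdx
theorem slice_pair_eq_eraseIdx (s : List Char) (k : Nat) :
    PySem.List.slice s (some (0 : Int)) (some (k : Int)) ++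
      PySem.List.slice s (some ((k : Int) + 1)) (some ((s.length : Int))) = s.eraseIdx k := by
  have h1 : ((k : Int) + 1) = ((k + 1 : Nat) : Int) := by push_cast; ring
  rw [h1, PySem.List.slice_zero_start, PySem.List.slice_to_natCast,
    PySem.List.slice_natCast, List.eraseIdx_eq_take_drop_succ]
  congr 1
  exact List.take_of_length_le (by simp)

-- sublist through a cons drops to the tail
theorem tail_sublist_of_sublist_cons {α : Type} {u w : List α} {x : α}
    (h : u.Sublist (x :: w)) : u.tail.Sublist w := by
  cases h with
  | cons _ h => exact (List.tail_sublist u).trans h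
  | cons₂ _ h => exact h

-- sublist through a trailing singleton drops to dropLast
theorem dropLast_sublist_of_sublist_concat {α : Type} {u w : List α} {b : α}
    (h : u.Sublist (w ++ [b])) : u.dropLast.Sublist w := by
  rcases (List.sublist_append_iff).mp h with ⟨r₁, r₂, rfl, h₁, h₂⟩
  rcases List.sublist_singleton.mp h₂ with rfl | rfl
  · simpa using (List.dropLast_sublist r₁).trans h₁
  · simpa [List.dropLast_concat] using h₁

-- the interior of a palindrome is a palindrome
theorem pal_tail_dropLast {u : List Char} (h : u.reverse = u) :
    (u.tail.dropLast).reverse = u.tail.dropLast := by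
  match u with
  | [] => rfl
  | [a] => rfl
  | a :: v =>
    rcases List.eq_nil_or_concat v with rfl | ⟨w, b, rfl⟩
    · rfl
    · have h' : b = a ∧ w.reverse = w ∧ a = b := by
        simpa [List.reverse_concat] using h
      simp [h'.2.1]

-- a palindrome's two end characters match
theorem pal_cons_concat {a b : Char} {w : List Char}
    (h : (a :: w ++ [b]).reverse = a :: w ++ [b]) : a = b := by
  have := congrArg (fun l => l.headI) h
  simpa [List.reverse_concat] using this.symm

-- characterisation of B's kernel for any budget k:
-- chk accepts iff some sublist missing at most k characters is a palindrome
theorem chk_iff_aux : ∀ n (c : List Char), c.length ≤ n → ∀ k,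
    (pvChk c k = true ↔ ∃ u : List Char, u.Sublist c ∧ c.length ≤ u.length + k ∧ u.reverse = u) := by
  intro n
  induction n with
  | zero =>
    intro c hc k
    have hcnil : c = [] := List.eq_nil_of_length_eq_zero (by omega)
    subst hcnil
    simp [pvChk]
  | succ n ih =>
    intro c hc k
    match c with
    | [] => simp [pvChk]
    | [a] =>
      simp only [pvChk, true_iff]
      exact ⟨[a], List.Sublist.refl _, by simp, rfl⟩
    | a :: x :: xs =>
      have hlne : (x :: xs) ≠ [] := List.cons_ne_nil x xs
      have hdecomp : x :: xs = (x :: xs).dropLast ++ [(x :: xs).getLast hlne] :=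
        (List.dropLast_concat_getLast hlne).symm
      have hml : ((x :: xs).dropLast).length = xs.length := by simp
      by_cases hab : a = (x :: xs).getLast hlne
      · rw [pvChk.eq_def]; dsimp only; rw [if_pos (beq_iff_eq.mpr hab)]
        rw [ih ((x :: xs).dropLast) (by simp at hc ⊢; omega) k]
        constructor
        · rintro ⟨u, hsub, hlen, hpal⟩
          refine ⟨a :: u ++ [(x :: xs).getLast hlne], ?_, ?_, ?_⟩
          · conv_rhs => rw [show a :: x :: xs = a :: ((x :: xs).dropLast ++ [(x :: xs).getLast hlne]) from by rw [← hdecomp]]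
            exact (hsub.append (List.Sublist.refl _)).cons₂ a
          · simp at hlen ⊢; omega
          · rw [← hab]
            simp [List.reverse_append, hpal]
        · rintro ⟨u, hsub, hlen, hpal⟩
          refine ⟨u.tail.dropLast, ?_, ?_, pal_tail_dropLast hpal⟩
          · have h1 : u.tail.Sublist (x :: xs) := tail_sublist_of_sublist_cons hsub
            rw [hdecomp] at h1
            exact dropLast_sublist_of_sublist_concat h1
          · have h2 : u.tail.dropLast.length = u.length - 1 - 1 := by simp
            simp at hlen hml ⊢
            omega
      · match k with
        | 0 =>
          rw [pvChk.eq_def]; dsimp only; rw [if_neg (by simpa using hab)]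
          simp only [Bool.false_eq_true, false_iff, not_exists]
          rintro u ⟨hsub, hlen, hpal⟩
          have hu : u = a :: x :: xs := hsub.eq_of_length_le (by omega)
          subst hu
          rw [hdecomp] at hpal
          exact hab (pal_cons_concat hpal)
        | k' + 1 =>
          rw [pvChk.eq_def]; dsimp only; rw [if_neg (by simpa using hab)]
          rw [Bool.or_eq_true, ih (x :: xs) (by simp at hc ⊢; omega) k',
            ih (a :: (x :: xs).dropLast) (by simp at hc ⊢; omega) k']
          constructor
          · rintro (⟨u, hsub, hlen, hpal⟩ | ⟨u, hsub, hlen, hpal⟩)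
            · exact ⟨u, hsub.trans (List.sublist_cons_self a _), by simp at hlen ⊢; omega, hpal⟩
            · refine ⟨u, hsub.trans ?_, by simp at hlen hml ⊢; omega, hpal⟩
              conv_rhs => rw [show a :: x :: xs = a :: ((x :: xs).dropLast ++ [(x :: xs).getLast hlne]) from by rw [← hdecomp]]
              exact (List.sublist_append_left _ _).cons₂ a
          · rintro ⟨u, hsub, hlen, hpal⟩
            by_cases h1 : u.Sublist (x :: xs)
            · exact Or.inl ⟨u, h1, by simp at hlen ⊢; omega, hpal⟩
            · by_cases h2 : u.Sublist (a :: (x :: xs).dropLast)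
              · exact Or.inr ⟨u, h2, by simp at hlen hml ⊢; omega, hpal⟩
              · exfalso
                cases hsub with
                | cons _ h => exact h1 h
                | cons₂ _ h =>
                  rw [hdecomp] at h
                  rcases List.sublist_append_iff.mp h with ⟨r₁, r₂, rfl, hr₁, hr₂⟩
                  rcases List.sublist_singleton.mp hr₂ with rfl | rfl
                  · exact h2 (by simpa using hr₁.cons₂ a)
                  · exact hab (pal_cons_concat hpal)

theorem chk_iff (c : List Char) (k : Nat) :
    pvChk c k = true ↔
      ∃ u : List Char, u.Sublist c ∧ c.length ≤ u.length + k ∧ u.reverse = u :=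
  chk_iff_aux c.length c le_rfl k

-- range(n) with an early-exit body = ∃ k < n
theorem any_pyRange_iff (n : Nat) (f : Int → Bool) :
    ((PySem.List.pyRange 0 (n : Int) 1).any f = true) ↔ ∃ k : Nat, k < n ∧ f (k : Int) = true := by
  rw [List.any_eq_true]
  constructor
  · rintro ⟨x, hm, hf⟩
    rw [PySem.List.mem_pyRange_one] at hm
    refine ⟨x.toNat, by omega, ?_⟩
    rwa [Int.toNat_of_nonneg hm.1]
  · rintro ⟨k, hk, hf⟩
    exact ⟨(k : Int), PySem.List.mem_pyRange_one.mpr ⟨by omega, by omega⟩, hf⟩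

-- A as a disjunction over single and double erasures
theorem A_eq_disj (t : String) :
    palindrome_without2letters t = true ↔
      (pvIsPal t.toList = true ∨ ∃ k : Nat, k < t.toList.length ∧
        (pvIsPal (t.toList.eraseIdx k) = true ∨ ∃ j : Nat, j < (t.toList.eraseIdx k).length ∧
          pvIsPal ((t.toList.eraseIdx k).eraseIdx j) = true)) := by
  rw [palindrome_without2letters]
  by_cases h0 : pvIsPal t.toList = true
  · simp [h0]
  · simp only [h0, Bool.false_eq_true, if_false, false_or]
    rw [PySem.Chars.len_eq, any_pyRange_iff]
    refine exists_congr fun k => and_congr_right fun hk => ?_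
    dsimp only
    simp only [slice_pair_eq_eraseIdx, PySem.Chars.len_eq]
    by_cases h1 : pvIsPal (t.toList.eraseIdx k) = true
    · simp [h1]
    · simp only [h1, Bool.false_eq_true, if_false, false_or]
      rw [any_pyRange_iff]
      exact exists_congr fun j => and_congr_right fun hj => by
        simp only [slice_pair_eq_eraseIdx]

theorem lower_len (s : List Char) : (PySem.Chars.lower s).length = s.length := by
  simp [PySem.Chars.lower]

theorem lower_eraseIdx (s : List Char) (i : Nat) :
    PySem.Chars.lower (s.eraseIdx i) = (PySem.Chars.lower s).eraseIdx i := by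
  simp [PySem.Chars.lower, List.eraseIdx_map]

-- characterisation of A: some sublist missing at most two characters is a palindrome
theorem A_iff (t : String) :
    palindrome_without2letters t = true ↔
      ∃ u : List Char, u.Sublist (PySem.Chars.lower t.toList) ∧
        (PySem.Chars.lower t.toList).length ≤ u.length + 2 ∧ u.reverse = u := by
  rw [A_eq_disj]
  simp only [pvIsPal_iff, lower_eraseIdx]
  constructor
  · rintro (hp | ⟨k, hk, hp | ⟨j, hj, hp⟩⟩)
    · exact ⟨_, List.Sublist.refl _, by omega, hp⟩
    · refine ⟨_, List.eraseIdx_sublist _ k, ?_, hp⟩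
      have := lower_len t.toList
      rw [List.length_eraseIdx]
      split_ifs <;> omega
    · refine ⟨_, (List.eraseIdx_sublist _ j).trans (List.eraseIdx_sublist _ k), ?_, hp⟩
      have h1 := lower_len t.toList
      have h2 : (t.toList.eraseIdx k).length = ((PySem.Chars.lower t.toList).eraseIdx k).length := by
        rw [← lower_eraseIdx, lower_len]
      rw [List.length_eraseIdx, List.length_eraseIdx]
      rw [List.length_eraseIdx] at h2 hj
      split_ifs at h2 hj ⊢ <;> omega
  · rintro ⟨u, hsub, hlen, hpal⟩
    have h1 := lower_len t.toList
    by_cases h0 : u.length = (PySem.Chars.lower t.toList).length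
    · left; rw [← hsub.eq_of_length_le (by omega)]; exact hpal
    · have hlt : u.length < (PySem.Chars.lower t.toList).length :=
        lt_of_le_of_ne hsub.length_le h0
      obtain ⟨i, hi, hsub1⟩ := sublist_eraseIdx_step hsub hlt
      refine Or.inr ⟨i, by omega, ?_⟩
      have h2 : ((PySem.Chars.lower t.toList).eraseIdx i).length =
          (PySem.Chars.lower t.toList).length - 1 := by
        rw [List.length_eraseIdx]; split_ifs <;> omega
      by_cases h3 : u.length = ((PySem.Chars.lower t.toList).eraseIdx i).length
      · left; rw [← hsub1.eq_of_length_le (by omega)]; exact hpal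
      · have hlt1 : u.length < ((PySem.Chars.lower t.toList).eraseIdx i).length :=
          lt_of_le_of_ne hsub1.length_le h3
        obtain ⟨j, hj, hsub2⟩ := sublist_eraseIdx_step hsub1 hlt1
        have h4 : (t.toList.eraseIdx i).length = ((PySem.Chars.lower t.toList).eraseIdx i).length := by
          rw [← lower_eraseIdx, lower_len]
        refine Or.inr ⟨j, by omega, ?_⟩
        have h5 : (((PySem.Chars.lower t.toList).eraseIdx i).eraseIdx j).length =
            (PySem.Chars.lower t.toList).length - 2 := by
          rw [List.length_eraseIdx]; split_ifs <;> omega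
        rw [← hsub2.eq_of_length_le (by omega)]; exact hpal

-- ===== VERDICT (by name: the statement is the Claim_ definition above) =====
theorem palindrome_without2letters_spec : Claim_equal_palindrome_without2letters := by
  intro t _
  unfold Spec_palindrome_without2letters palindrome_without2letters_alt
  exact Bool.eq_iff_iff.mpr ((A_iff t).trans (chk_iff (PySem.Chars.lower t.toList) 2).symm)
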